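-- pv_equiv track=rewrite | github.com/practual/cartographers | game.py | sentinel_wood
-- ===== SOURCE A (Python) =====
-- def sentinel_wood(coords_to_terrain, terrain_to_coords):
--     score = 0
--     for col in range(11):
--         if coords_to_terrain.get((col, 0)) == 'forest':
--             score += 1
--         if coords_to_terrain.get((col, 10)) == 'forest':
--             score += 1
--     for row in range(11):
--         if coords_to_terrain.get((0, row)) == 'forest':
--             score += 1
--         if coords_to_terrain.get((10, row)) == 'forest':
--             score += 1
--     return score
-- ===== SOURCE B (Python) =====
-- def sentinel_wood(coords_to_terrain, terrain_to_coords):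
--     score = 0
--     for (x, y), terrain in coords_to_terrain.items():
--         if terrain == 'forest' and 0 <= x <= 10 and 0 <= y <= 10:
--             score += (x == 0) + (x == 10) + (y == 0) + (y == 10)
--     return score
-- ===== Notes on version B (the rewrite author's own statement) =====
-- stated objective: simpler
-- what changed: B makes a single pass over the placed tiles, adding for each forest tile on the board the number of edge lines it lies on, instead of A's two scans over the 44 fixed edge positions with a dict lookup at each; corner tiles are double-counted by both automatically.
import Mathlib
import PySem

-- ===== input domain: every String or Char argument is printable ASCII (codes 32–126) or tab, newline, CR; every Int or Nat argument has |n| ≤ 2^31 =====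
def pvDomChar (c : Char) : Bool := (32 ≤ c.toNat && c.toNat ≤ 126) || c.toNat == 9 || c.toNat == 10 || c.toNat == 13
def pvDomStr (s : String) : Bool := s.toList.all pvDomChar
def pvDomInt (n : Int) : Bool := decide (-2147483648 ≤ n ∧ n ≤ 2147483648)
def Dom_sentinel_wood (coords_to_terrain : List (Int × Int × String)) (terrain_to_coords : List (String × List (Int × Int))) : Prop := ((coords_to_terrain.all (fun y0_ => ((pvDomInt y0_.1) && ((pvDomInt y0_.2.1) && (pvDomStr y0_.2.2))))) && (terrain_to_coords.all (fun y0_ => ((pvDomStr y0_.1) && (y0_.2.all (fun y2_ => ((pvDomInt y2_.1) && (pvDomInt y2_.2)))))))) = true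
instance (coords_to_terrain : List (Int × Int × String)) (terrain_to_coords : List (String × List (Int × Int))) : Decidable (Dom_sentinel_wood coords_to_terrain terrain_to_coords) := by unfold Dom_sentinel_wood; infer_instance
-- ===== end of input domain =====

-- B replaces A's two scans over the 44 fixed edge positions by one pass over the
-- placed tiles, adding per on-board forest tile the number of edge lines it lies on
-- (objective: simpler; the corner double-count is reproduced arithmetically).

-- ===== PORT A =====
-- coords_to_terrain.get(k): first match in the association list (= the unique match on Pre_)
def swGet (d : List (Int × Int × String)) (k : Int × Int) : Option String :=
  (d.find? (fun e => (e.1, e.2.1) == k)).map (fun e => e.2.2)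

def sentinel_wood (coords_to_terrain : List (Int × Int × String)) (terrain_to_coords : List (String × List (Int × Int))) : Int :=
  let score : Int := 0
  let score := (PySem.List.pyRange 0 11 1).foldl (fun score col =>
    let score := if swGet coords_to_terrain (col, 0) == some "forest" then score + 1 else score
    if swGet coords_to_terrain (col, 10) == some "forest" then score + 1 else score) score
  let score := (PySem.List.pyRange 0 11 1).foldl (fun score row =>
    let score := if swGet coords_to_terrain (0, row) == some "forest" then score + 1 else score
    if swGet coords_to_terrain (10, row) == some "forest" then score + 1 else score) score
  score

-- ===== PORT B =====
def sentinel_wood_alt (coords_to_terrain : List (Int × Int × String)) (terrain_to_coords : List (String × List (Int × Int))) : Int :=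
  coords_to_terrain.foldl (fun score e =>
    let x := e.1
    let y := e.2.1
    let terrain := e.2.2
    if terrain == "forest" && (decide (0 ≤ x) && decide (x ≤ 10)) && (decide (0 ≤ y) && decide (y ≤ 10)) then
      score + ((if x == 0 then (1:Int) else 0) + (if x == 10 then 1 else 0)
             + (if y == 0 then 1 else 0) + (if y == 10 then 1 else 0))
    else score) 0

-- ===== PRECONDITION & SPEC =====
-- Pre_ requires the coordinate keys of the association list to be pairwise distinct — the
-- invariant every Python dict satisfies; it excludes only duplicate-key lists that the List
-- encoding of a dict allows but no Python dict input exhibits.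
def Pre_sentinel_wood (coords_to_terrain : List (Int × Int × String)) (terrain_to_coords : List (String × List (Int × Int))) : Prop :=
  (coords_to_terrain.map (fun e => (e.1, e.2.1))).Nodup
instance (coords_to_terrain : List (Int × Int × String)) (terrain_to_coords : List (String × List (Int × Int))) : Decidable (Pre_sentinel_wood coords_to_terrain terrain_to_coords) := by unfold Pre_sentinel_wood; infer_instance
def pvWitness_sentinel_wood : (List (Int × Int × String)) × (List (String × List (Int × Int))) :=
  ([((0:Int), (0:Int), "forest"), ((5:Int), (10:Int), "forest"), ((3:Int), (3:Int), "water")], [("forest", [((0:Int), (0:Int))])])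

def Spec_sentinel_wood (coords_to_terrain : List (Int × Int × String)) (terrain_to_coords : List (String × List (Int × Int))) (out : Int) : Prop := out = sentinel_wood_alt coords_to_terrain terrain_to_coords
instance (coords_to_terrain : List (Int × Int × String)) (terrain_to_coords : List (String × List (Int × Int))) (out : Int) : Decidable (Spec_sentinel_wood coords_to_terrain terrain_to_coords out) := by unfold Spec_sentinel_wood; infer_instance

-- ===== CLAIM (what is proved, stated in full; the proofs are below) =====
def Claim_equal_sentinel_wood : Prop := ∀ (coords_to_terrain : List (Int × Int × String)) (terrain_to_coords : List (String × List (Int × Int))), Dom_sentinel_wood coords_to_terrain terrain_to_coords → Pre_sentinel_wood coords_to_terrain terrain_to_coords → Spec_sentinel_wood coords_to_terrain terrain_to_coords (sentinel_wood coords_to_terrain terrain_to_coords)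

-- ===== LEMMAS AND PROOFS =====

-- 0/1 indicator of "the dict holds forest at q"
def swInd (d : List (Int × Int × String)) (q : Int × Int) : Int :=
  if swGet d q == some "forest" then 1 else 0

-- the 44 edge queries of A, in traversal order, as four strips
def swQ : List (Int × Int) :=
  ((PySem.List.pyRange 0 11 1).map (fun c => (c, (0:Int))))
  ++ ((PySem.List.pyRange 0 11 1).map (fun c => (c, (10:Int))))
  ++ ((PySem.List.pyRange 0 11 1).map (fun r => ((0:Int), r)))
  ++ ((PySem.List.pyRange 0 11 1).map (fun r => ((10:Int), r)))

-- per-tile contribution of B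
def swContrib (e : Int × Int × String) : Int :=
  if e.2.2 == "forest" && (decide (0 ≤ e.1) && decide (e.1 ≤ 10)) && (decide (0 ≤ e.2.1) && decide (e.2.1 ≤ 10)) then
    (if e.1 == 0 then (1:Int) else 0) + (if e.1 == 10 then 1 else 0)
      + (if e.2.1 == 0 then 1 else 0) + (if e.2.1 == 10 then 1 else 0)
  else 0

theorem swGet_cons (x y : Int) (v : String) (rest : List (Int × Int × String)) (q : Int × Int) :
    swGet ((x, y, v) :: rest) q = if (x, y) == q then some v else swGet rest q := by
  simp only [swGet, List.find?_cons]
  split <;> simp_all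

theorem swGet_eq_none (rest : List (Int × Int × String)) (k : Int × Int)
    (h : k ∉ rest.map (fun e => (e.1, e.2.1))) : swGet rest k = none := by
  simp only [swGet, Option.map_eq_none_iff, List.find?_eq_none]
  intro e he
  simp only [List.mem_map] at h
  intro hb
  exact h ⟨e, he, by simpa using (beq_iff_eq.mp hb)⟩

theorem sum_swInd_cons (x y : Int) (v : String) (rest : List (Int × Int × String))
    (h : swGet rest (x, y) = none) (L : List (Int × Int)) :
    (L.map (swInd ((x, y, v) :: rest))).sum
      = (if v == "forest" then 1 else 0) * (L.count (x, y) : Int) + (L.map (swInd rest)).sum := by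
  induction L with
  | nil => simp
  | cons q L ih =>
    simp only [List.map_cons, List.sum_cons, ih, List.count_cons]
    by_cases hq : (x, y) = q
    · subst hq
      by_cases hv : v = "forest" <;>
        simp [swInd, swGet_cons, h, hv] <;> push_cast <;> ring
    · have hb : ((x, y) == q) = false := by simpa using hq
      have hb' : (q == (x, y)) = false := by simpa using Ne.symm hq
      simp only [swInd, swGet_cons, hb, hb']
      push_cast
      ring

theorem sum_map_add2 (l : List Int) (f g : Int → Int) :
    (l.map (fun c => f c + g c)).sum = (l.map f).sum + (l.map g).sum := by
  induction l with
  | nil => simp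
  | cons a l ih => simp [ih]; ring

theorem swA_eq_sum (d : List (Int × Int × String)) (tc : List (String × List (Int × Int))) :
    sentinel_wood d tc = (swQ.map (swInd d)).sum := by
  have h1 : ∀ init : Int, (PySem.List.pyRange 0 11 1).foldl (fun score col =>
      let score := if swGet d (col, 0) == some "forest" then score + 1 else score
      if swGet d (col, 10) == some "forest" then score + 1 else score) init
      = init + ((PySem.List.pyRange 0 11 1).map (fun c => swInd d (c, 0) + swInd d (c, 10))).sum := by
    intro init
    refine (PySem.List.foldl_congr_mem _ _ _ init ?_).trans (PySem.List.foldl_add _ _ _)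
    intro acc c _; simp only [swInd]; split <;> split <;> ring
  have h2 : ∀ init : Int, (PySem.List.pyRange 0 11 1).foldl (fun score row =>
      let score := if swGet d (0, row) == some "forest" then score + 1 else score
      if swGet d (10, row) == some "forest" then score + 1 else score) init
      = init + ((PySem.List.pyRange 0 11 1).map (fun r => swInd d (0, r) + swInd d (10, r))).sum := by
    intro init
    refine (PySem.List.foldl_congr_mem _ _ _ init ?_).trans (PySem.List.foldl_add _ _ _)
    intro acc c _; simp only [swInd]; split <;> split <;> ring
  simp only [sentinel_wood]
  rw [h2, h1]
  simp only [swQ, List.map_append, List.map_map, List.sum_append, Function.comp_def]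
  rw [sum_map_add2, sum_map_add2]
  ring

theorem count_range11 (x : Int) :
    (((PySem.List.pyRange 0 11 1).count x : Int)) = if 0 ≤ x ∧ x ≤ 10 then 1 else 0 := by
  have hr : PySem.List.pyRange 0 11 1 = [0,1,2,3,4,5,6,7,8,9,10] := by decide
  rw [hr]
  simp only [List.count_cons, List.count_nil, beq_iff_eq]
  push_cast
  omega

theorem count_strip_fst (l : List Int) (y0 x y : Int) :
    ((l.map (fun c => (c, y0))).count (x, y)) = if y = y0 then l.count x else 0 := by
  induction l with
  | nil => simp
  | cons a l ih =>
    simp only [List.map_cons, List.count_cons, ih, beq_iff_eq, Prod.mk.injEq]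
    by_cases hy : y = y0 <;> by_cases hax : a = x <;> simp_all <;> omega

theorem count_strip_snd (l : List Int) (x0 x y : Int) :
    ((l.map (fun r => (x0, r))).count (x, y)) = if x = x0 then l.count y else 0 := by
  induction l with
  | nil => simp
  | cons a l ih =>
    simp only [List.map_cons, List.count_cons, ih, beq_iff_eq, Prod.mk.injEq]
    by_cases hx : x = x0 <;> by_cases hay : a = y <;> simp_all <;> omega

theorem swContrib_eq (x y : Int) (v : String) :
    (if v == "forest" then (1:Int) else 0) * (swQ.count (x, y) : Int) = swContrib (x, y, v) := by
  have hc : ((swQ.count (x, y) : Int))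
      = (if 0 ≤ x ∧ x ≤ 10 ∧ 0 ≤ y ∧ y ≤ 10 then
          (if x = 0 then 1 else 0) + (if x = 10 then 1 else 0)
            + (if y = 0 then 1 else 0) + (if y = 10 then 1 else 0) else 0) := by
    simp only [swQ, List.count_append, count_strip_fst, count_strip_snd]
    push_cast
    rw [count_range11, count_range11]
    by_cases h0 : y = 0 <;> by_cases h10 : y = 10 <;> by_cases g0 : x = 0 <;> by_cases g10 : x = 10 <;>
      simp_all <;> omega
  rw [hc]
  simp only [swContrib, beq_iff_eq, decide_eq_true_eq, Bool.and_eq_true]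
  by_cases hv : v = "forest" <;> simp [hv] <;> split_ifs <;> omega

theorem swB_eq_sum (d : List (Int × Int × String)) (tc : List (String × List (Int × Int))) :
    sentinel_wood_alt d tc = (d.map swContrib).sum := by
  simp only [sentinel_wood_alt]
  refine (PySem.List.foldl_congr_mem _ _ _ 0 ?_).trans ((PySem.List.foldl_add _ _ _).trans (by ring))
  intro acc e _
  simp only [swContrib]
  split <;> ring

theorem sw_final (d : List (Int × Int × String)) (tc : List (String × List (Int × Int)))
    (h : (d.map (fun e => (e.1, e.2.1))).Nodup) :
    sentinel_wood d tc = sentinel_wood_alt d tc := by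
  rw [swA_eq_sum d tc, swB_eq_sum d tc]
  induction d with
  | nil =>
    have hz : (swQ.map (swInd [])).sum = ((swQ.map (fun _ => (0:Int))).sum) :=
      congrArg List.sum (List.map_congr_left (fun q _ => rfl))
    rw [hz]
    simp
  | cons e rest ih =>
    obtain ⟨x, y, v⟩ := e
    simp only [List.map_cons, List.nodup_cons] at h
    rw [sum_swInd_cons x y v rest (swGet_eq_none rest (x, y) h.1) swQ]
    simp only [List.map_cons, List.sum_cons, ih h.2, swContrib_eq]

-- ===== VERDICT (by name: the statement is the Claim_ definition above) =====
theorem sentinel_wood_spec : Claim_equal_sentinel_wood := by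
  intro d tc _ hpre
  unfold Spec_sentinel_wood
  exact sw_final d tc hpre
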